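-- pv_equiv track=rewrite | github.com/cocobolo-desk/School-project | maps_and_cycling.py | check_friendliness
-- ===== SOURCE A (Python) =====
-- def check_friendliness(feature):
--     """Checks if a path is bike-friendly given a dictionary for a path."""
--     for obj_property in feature['properties'].keys():
--         if obj_property == 'bicycle':
--             return True
--         elif obj_property in ['cycleway', 'cycleway:left', 'cycleway:right', 'cycleway:both'] \
--                 and feature['properties'][obj_property] != 'no':
--             return True
--         elif obj_property == 'highway' \
--                 and feature['properties'][obj_property] == 'cycleway':
--             return True
--     return False
-- ===== SOURCE B (Python) =====
-- def check_friendliness(feature):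
--     """Checks if a path is bike-friendly given a dictionary for a path."""
--     props = feature['properties']
--     if 'bicycle' in props:
--         return True
--     for key in ('cycleway', 'cycleway:left', 'cycleway:right', 'cycleway:both'):
--         if key in props and props[key] != 'no':
--             return True
--     return props.get('highway') == 'cycleway'
-- ===== Notes on version B (the rewrite author's own statement) =====
-- stated objective: simpler
-- what changed: Instead of scanning every key of the properties dict and classifying each, B performs four targeted constant-time membership/lookup checks against the fixed key set ('bicycle', the four cycleway variants, 'highway').
import Mathlib
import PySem

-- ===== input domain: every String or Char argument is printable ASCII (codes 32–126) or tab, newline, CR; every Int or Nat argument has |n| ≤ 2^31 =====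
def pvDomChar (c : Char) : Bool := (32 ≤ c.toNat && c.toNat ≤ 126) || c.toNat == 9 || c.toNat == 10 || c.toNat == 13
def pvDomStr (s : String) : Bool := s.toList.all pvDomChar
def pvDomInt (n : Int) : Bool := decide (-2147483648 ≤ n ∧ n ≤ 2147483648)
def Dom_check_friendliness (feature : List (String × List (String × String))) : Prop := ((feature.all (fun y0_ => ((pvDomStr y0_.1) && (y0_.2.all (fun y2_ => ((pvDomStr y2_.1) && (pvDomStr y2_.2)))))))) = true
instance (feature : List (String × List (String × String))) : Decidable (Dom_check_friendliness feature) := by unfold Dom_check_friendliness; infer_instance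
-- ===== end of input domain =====

-- B simplifies A's full scan of the property keys into targeted lookups of the fixed keys; same result.
-- ===== PORT A =====
-- the literal list in A's 'elif obj_property in [...]'
def pvCycListA : List String := ["cycleway", "cycleway:left", "cycleway:right", "cycleway:both"]

-- A's for-loop over feature['properties'].keys() with its early returns
def pvLoopA (d : PySem.Dict String String) : List String → Bool
  | [] => false
  | k :: ks =>
    if k = "bicycle" then true
    else if k ∈ pvCycListA ∧ d.getD k "" ≠ "no" then true
    else if k = "highway" ∧ d.getD k "" = "cycleway" then true
    else pvLoopA d ks
-- note: 'd.getD k ""' ports 'feature['properties'][obj_property]'; exact because k is drawn from d.keys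

def check_friendliness (feature : List (String × List (String × String))) : Bool :=
  match (PySem.Dict.ofList feature).get? "properties" with
  | some props => pvLoopA (PySem.Dict.ofList props) (PySem.Dict.ofList props).keys
  | none => false   -- Python raises KeyError here; excluded by Pre_

-- ===== PORT B =====
def pvCycKeysB : List String := ["cycleway", "cycleway:left", "cycleway:right", "cycleway:both"]

def check_friendliness_alt (feature : List (String × List (String × String))) : Bool :=
  match (PySem.Dict.ofList feature).get? "properties" with
  | some propsList =>
    let props := PySem.Dict.ofList propsList
    if props.contains "bicycle" then true
    else if pvCycKeysB.any (fun k => props.contains k && props.getD k "" != "no") then true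
    else props.get? "highway" == some "cycleway"
  | none => false   -- Python raises KeyError here; excluded by Pre_

-- ===== PRECONDITION & SPEC =====
-- Pre_ excludes exactly the inputs without a 'properties' key, on which the Python A raises KeyError (B raises too).
def Pre_check_friendliness (feature : List (String × List (String × String))) : Prop :=
  "properties" ∈ feature.map Prod.fst
instance (feature : List (String × List (String × String))) : Decidable (Pre_check_friendliness feature) := by unfold Pre_check_friendliness; infer_instance
def pvWitness_check_friendliness : (List (String × List (String × String))) := [("properties", [("highway", "cycleway")])]
def Spec_check_friendliness (feature : List (String × List (String × String))) (out : Bool) : Prop := out = check_friendliness_alt feature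
instance (feature : List (String × List (String × String))) (out : Bool) : Decidable (Spec_check_friendliness feature out) := by unfold Spec_check_friendliness; infer_instance

-- ===== CLAIM (what is proved, stated in full; the proofs are below) =====
def Claim_equal_check_friendliness : Prop := ∀ (feature : List (String × List (String × String))), Dom_check_friendliness feature → Pre_check_friendliness feature → Spec_check_friendliness feature (check_friendliness feature)

-- ===== LEMMAS AND PROOFS =====

-- A's early-return loop is an 'any' of its branch conditions
theorem pvLoopA_eq_any (d : PySem.Dict String String) (ks : List String) :
    pvLoopA d ks = ks.any (fun k =>
      (k == "bicycle") ||
      (decide (k ∈ pvCycListA) && !(d.getD k "" == "no")) ||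
      ((k == "highway") && (d.getD k "" == "cycleway"))) := by
  induction ks with
  | nil => simp [pvLoopA]
  | cons k ks ih =>
    simp only [pvLoopA, List.any_cons, ih]
    split_ifs with h1 h2 h3
    · simp_all
    · simp_all
    · obtain ⟨rfl, hv⟩ := h3
      simp [hv]
    · simp_all

theorem pvGet?_eq_some_iff (d : PySem.Dict String String) (k v : String) :
    d.get? k = some v ↔ k ∈ d.keys ∧ d.getD k "" = v := by
  rw [PySem.Dict.getD_eq_get?_getD]
  cases h : d.get? k with
  | none =>
    have := (PySem.Dict.get?_eq_none_iff_not_mem_keys (d := d) (k := k)).mp h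
    simp_all
  | some a =>
    have hc : d.contains k = true := by
      rw [PySem.Dict.contains_eq_isSome_get?, h]; rfl
    have := (PySem.Dict.contains_iff_mem_keys (d := d) (k := k)).mp hc
    simp_all

-- ===== VERDICT (by name: the statement is the Claim_ definition above) =====

theorem check_friendliness_spec : Claim_equal_check_friendliness := by
  intro feature _ _
  unfold Spec_check_friendliness check_friendliness check_friendliness_alt
  cases hp : (PySem.Dict.ofList feature).get? "properties" with
  | none => rfl
  | some props =>
    simp only []
    set d := PySem.Dict.ofList props with hd
    rw [pvLoopA_eq_any]
    rw [Bool.eq_iff_iff]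
    simp only [List.any_eq_true, Bool.or_eq_true, Bool.and_eq_true, beq_iff_eq,
       bne_iff_ne, decide_eq_true_eq, pvCycListA, pvCycKeysB,
      List.mem_cons, List.not_mem_nil,
      PySem.Dict.contains_iff_mem_keys, pvGet?_eq_some_iff,
      Bool.if_true_left]
    aesop
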